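-- pv_equiv track=rewrite | github.com/Samalot32/Fun-Phonetics-AI | backend_kevin/05-realtime-openai/import speech_recognition as sr.py | break_word_into_sounds
-- ===== SOURCE A (Python) =====
-- def break_word_into_sounds(word):
--     vowels = ['a', 'e', 'i', 'o', 'u']
--     sounds = []
--     i = 0
--
--     while i < len(word):
--         if word[i] in vowels:
--             sounds.append(word[i])
--             i += 1
--         else:
--             if i < len(word) - 1 and word[i + 1] not in vowels:
--                 sounds.append(word[i:i + 2])
--                 i += 2
--             else:
--                 sounds.append(word[i])
--                 i += 1
--
--     return sounds
-- ===== SOURCE B (Python) =====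
-- def break_word_into_sounds(word):
--     sounds = []
--     pending = None  # a consonant waiting for a possible consonant partner
--     for c in word:
--         if c in 'aeiou':
--             if pending is not None:
--                 sounds.append(pending)
--                 pending = None
--             sounds.append(c)
--         elif pending is None:
--             pending = c
--         else:
--             sounds.append(pending + c)
--             pending = None
--     if pending is not None:
--         sounds.append(pending)
--     return sounds
-- ===== Notes on version B (the rewrite author's own statement) =====
-- stated objective: faster
-- what changed: Replaces the index-based variable-step while loop with lookahead word[i+1] by a single left-to-right fold over the characters that keeps one pending consonant and flushes it on a vowel, a consonant partner, or at the end; avoids per-step indexing and slicing.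
import Mathlib
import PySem

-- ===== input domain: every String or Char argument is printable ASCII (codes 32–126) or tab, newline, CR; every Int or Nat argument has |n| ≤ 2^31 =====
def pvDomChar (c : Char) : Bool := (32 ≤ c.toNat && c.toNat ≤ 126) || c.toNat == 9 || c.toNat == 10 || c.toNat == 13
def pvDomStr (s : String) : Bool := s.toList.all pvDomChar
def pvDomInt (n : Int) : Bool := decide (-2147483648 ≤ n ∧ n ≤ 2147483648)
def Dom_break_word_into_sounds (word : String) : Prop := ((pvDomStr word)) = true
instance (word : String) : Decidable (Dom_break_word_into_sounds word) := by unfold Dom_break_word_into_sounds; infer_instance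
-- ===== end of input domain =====

-- B replaces A's index/lookahead loop by one fold holding a pending consonant; same values, same cost.

-- ===== PORT A =====
-- vowels = ['a','e','i','o','u']
def vowelsA : List Char := ['a', 'e', 'i', 'o', 'u']

-- A's while loop over index i; for Nat i, Python's `i < len(word) - 1` is `i + 1 < length`,
-- and word[i], word[i+1], word[i:i+2] are in range exactly under the guards shown.
def goA (cs : List Char) (i : Nat) : List String :=
  if h : i < cs.length then
    if cs[i] ∈ vowelsA then
      String.ofList [cs[i]] :: goA cs (i + 1)
    else
      if h2 : i + 1 < cs.length then
        if cs[i + 1] ∉ vowelsA then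
          String.ofList [cs[i], cs[i + 1]] :: goA cs (i + 2)   -- word[i:i+2]
        else
          String.ofList [cs[i]] :: goA cs (i + 1)
      else
        String.ofList [cs[i]] :: goA cs (i + 1)
  else []
termination_by cs.length - i

def break_word_into_sounds (word : String) : List String := goA word.toList 0

-- ===== PORT B =====
-- one step of B's for-loop: state = (sounds so far, pending consonant)
def stepB (st : List String × Option Char) (c : Char) : List String × Option Char :=
  if c ∈ "aeiou".toList then
    match st with
    | (sounds, some p) => (sounds ++ [String.ofList [p], String.ofList [c]], none)
    | (sounds, none) => (sounds ++ [String.ofList [c]], none)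
  else
    match st with
    | (sounds, none) => (sounds, some c)
    | (sounds, some p) => (sounds ++ [String.ofList [p, c]], none)

-- the final flush of the pending consonant
def finishB (st : List String × Option Char) : List String :=
  match st with
  | (sounds, some p) => sounds ++ [String.ofList [p]]
  | (sounds, none) => sounds

def break_word_into_sounds_alt (word : String) : List String :=
  finishB (word.toList.foldl stepB ([], none))

-- ===== PRECONDITION & SPEC =====
def Spec_break_word_into_sounds (word : String) (out : List String) : Prop := out = break_word_into_sounds_alt word
instance (word : String) (out : List String) : Decidable (Spec_break_word_into_sounds word out) := by unfold Spec_break_word_into_sounds; infer_instance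

-- ===== CLAIM (what is proved, stated in full; the proofs are below) =====
def Claim_equal_break_word_into_sounds : Prop := ∀ (word : String), Dom_break_word_into_sounds word → Spec_break_word_into_sounds word (break_word_into_sounds word)

-- ===== LEMMAS AND PROOFS =====

-- reference chunking of a character list, used to bridge the two ports
def chunks : List Char → List String
  | [] => []
  | c :: rest =>
    if c ∈ vowelsA then String.ofList [c] :: chunks rest
    else
      match rest with
      | [] => [String.ofList [c]]
      | d :: rest' =>
        if d ∈ vowelsA then String.ofList [c] :: chunks (d :: rest')
        else String.ofList [c, d] :: chunks rest'

lemma vowels_same : "aeiou".toList = vowelsA := by decide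

lemma foldl_chunks : ∀ (cs : List Char) (sounds : List String),
    finishB (cs.foldl stepB (sounds, none)) = sounds ++ chunks cs := by
  intro cs
  fun_induction chunks cs with
  | case1 => intro sounds; simp [finishB]
  | case2 c rest hv ih =>
    intro sounds
    have h1 := ih (sounds ++ [String.ofList [c]])
    simp [List.foldl_cons, stepB, vowels_same, hv] at h1 ⊢
    simpa using h1
  | case3 c hv =>
    intro sounds
    simp [List.foldl, stepB, vowels_same, hv, finishB]
  | case4 c hv d rest' hdv ih =>
    intro sounds
    have h1 := ih (sounds ++ [String.ofList [c]])
    simp [List.foldl_cons, stepB, vowels_same, hv, hdv] at h1 ⊢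
    simpa using h1
  | case5 c hv d rest' hdv ih =>
    intro sounds
    have h1 := ih (sounds ++ [String.ofList [c, d]])
    simp [List.foldl_cons, stepB, vowels_same, hv, hdv] at h1 ⊢
    simpa using h1

lemma goA_chunks : ∀ (cs : List Char) (i : Nat), goA cs i = chunks (cs.drop i) := by
  intro cs i
  fun_induction goA cs i with
  | case1 x h hv ih =>
    rw [List.drop_eq_getElem_cons h]
    conv_rhs => rw [chunks.eq_def]
    simp [hv, ih, -List.getElem_cons_drop]
  | case2 x h hnv h2 hdv ih =>
    rw [List.drop_eq_getElem_cons h, List.drop_eq_getElem_cons h2]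
    conv_rhs => rw [chunks.eq_def]
    simp [hnv, hdv, ih, -List.getElem_cons_drop]
  | case3 x h hnv h2 hdv ih =>
    rw [ih, List.drop_eq_getElem_cons h, List.drop_eq_getElem_cons h2]
    conv_rhs => rw [chunks.eq_def]
    simp [hnv, not_not.mp hdv, -List.getElem_cons_drop]
  | case4 x h hnv hn2 ih =>
    have hnil : cs.drop (x + 1) = [] := List.drop_eq_nil_of_le (by omega)
    rw [ih, List.drop_eq_getElem_cons h, hnil]
    conv_rhs => rw [chunks.eq_def]
    simp [hnv, chunks, -List.getElem_cons_drop]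
  | case5 x h =>
    rw [List.drop_eq_nil_of_le (by omega)]
    simp [chunks]

-- ===== VERDICT (by name: the statement is the Claim_ definition above) =====
theorem break_word_into_sounds_spec : Claim_equal_break_word_into_sounds := by
  intro word _
  show break_word_into_sounds word = break_word_into_sounds_alt word
  rw [break_word_into_sounds, break_word_into_sounds_alt, goA_chunks,
    foldl_chunks word.toList []]
  simp
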